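-- pv_equiv track=rewrite | github.com/mh-algo/algorithm | BOJ/Python3/2533.py | dfs
-- ===== SOURCE A (Python) =====
-- def dfs(tree, check, n=1):
--     check[n] = True
--     children = [next_node for next_node in tree[n] if not check[next_node]]
--     not_pick, pick = 0, 1
--     for child in children:
--         child_not_pick, child_pick = dfs(tree, check, child)
--         not_pick += child_pick
--         pick += min(child_not_pick, child_pick)
--     return not_pick, pick
-- ===== SOURCE B (Python) =====
-- def dfs(tree, check, n=1):
--     # Iterative post-order DFS with an explicit stack instead of recursion.
--     # Mutates check exactly as the recursive version does; same return value.
--     check[n] = True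
--     stack = [[[c for c in tree[n] if not check[c]], 0, 1]]
--     while True:
--         frame = stack[-1]
--         pending = frame[0]
--         if pending:
--             child = pending.pop(0)
--             check[child] = True
--             stack.append([[c for c in tree[child] if not check[c]], 0, 1])
--         else:
--             stack.pop()
--             not_pick, pick = frame[1], frame[2]
--             if not stack:
--                 return not_pick, pick
--             parent = stack[-1]
--             parent[1] += pick
--             parent[2] += min(not_pick, pick)
-- ===== Notes on version B (the rewrite author's own statement) =====
-- stated objective: alternative
-- what changed: A's recursive tree DP is replaced by an iterative post-order DFS over an explicit stack of (pending-children, not_pick, pick) frames, finalizing a frame into its parent when its pending list is exhausted; no recursion is used.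
-- outside the precondition, e.g. on dfs({0: [-1, 0]}, [False], 0): A returns (0, 1), B returns (0, 1)
import Mathlib
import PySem

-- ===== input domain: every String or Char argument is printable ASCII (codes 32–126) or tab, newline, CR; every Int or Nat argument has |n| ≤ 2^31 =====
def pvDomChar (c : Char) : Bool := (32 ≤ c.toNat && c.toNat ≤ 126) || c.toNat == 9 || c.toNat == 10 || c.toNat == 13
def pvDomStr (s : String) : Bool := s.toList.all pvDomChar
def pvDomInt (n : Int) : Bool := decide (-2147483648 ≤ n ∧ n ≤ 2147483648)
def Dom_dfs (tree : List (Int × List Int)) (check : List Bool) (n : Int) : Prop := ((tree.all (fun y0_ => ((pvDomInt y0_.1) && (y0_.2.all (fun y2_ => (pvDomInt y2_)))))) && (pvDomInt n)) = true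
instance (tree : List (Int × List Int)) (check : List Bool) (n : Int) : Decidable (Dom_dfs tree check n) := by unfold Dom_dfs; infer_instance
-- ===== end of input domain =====

-- B replaces A's recursion by an iterative explicit-stack post-order DFS (alternative decomposition,
-- same asymptotic cost); both versions mark `check` identically, the proved equivalence is about the
-- returned pair (the `check` mutation is a side effect of both Pythons, performed the same way).

-- ===== PORT A =====
-- tree[x] (dict lookup, first match)
def lookupAdj (tree : List (Int × List Int)) (x : Int) : Option (List Int) :=
  match tree with
  | [] => none
  | (k, vs) :: rest => if k == x then some vs else lookupAdj rest x

-- [c for c in adj if not check[c]]  (none = IndexError inside the comprehension)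
def filterUnchecked (check : List Bool) : List Int → Option (List Int)
  | [] => some []
  | c :: cs =>
    match PySem.List.pyGet? check c with
    | none => none
    | some b =>
      match filterUnchecked check cs with
      | none => none
      | some rest => some (if b then rest else c :: rest)

-- [next_node for next_node in tree[x] if not check[next_node]]
def childrenOf (tree : List (Int × List Int)) (check : List Bool) (x : Int) : Option (List Int) :=
  match lookupAdj tree x with
  | none => none
  | some adj => filterUnchecked check adj

mutual
-- A's recursion; the Nat argument is pure fuel making the recursion total (A has no such guard)
def dfsA (fuel : Nat) (tree : List (Int × List Int)) (check : List Bool) (n : Int) :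
    Option (List Bool × Int × Int) :=
  match fuel with
  | 0 => none
  | fuel + 1 =>
    match PySem.List.pySet? check n true with      -- check[n] = True
    | none => none
    | some check1 =>
      match childrenOf tree check1 n with
      | none => none
      | some cs => goA fuel tree check1 cs 0 1
termination_by (fuel, 0)

-- A's `for child in children` loop, threading check and the two accumulators
def goA (fuel : Nat) (tree : List (Int × List Int)) (check : List Bool) (cs : List Int)
    (np p : Int) : Option (List Bool × Int × Int) :=
  match cs with
  | [] => some (check, np, p)
  | c :: rest =>
    match dfsA fuel tree check c with
    | none => none
    | some (check', cnp, cp) => goA fuel tree check' rest (np + cp) (p + min cnp cp)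
termination_by (fuel, cs.length + 1)
end

def dfs (tree : List (Int × List Int)) (check : List Bool) (n : Int) : Int × Int :=
  match dfsA (check.length + 1) tree check n with
  | some (_, np, p) => (np, p)
  | none => (0, 0)      -- A raises here (outside Pre_dfs); the fuel check.length+1 is proved sufficient on Pre_dfs

-- ===== PORT B =====
def adjSize (tree : List (Int × List Int)) : Nat := (tree.map (fun pr => pr.2.length)).sum

-- fuel bound for the loop, proved sufficient on Pre_dfs (B's Python loops without a guard)
def bigFuel (tree : List (Int × List Int)) (check : List Bool) : Nat :=
  (adjSize tree + 3) ^ (check.length + 2)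

-- one frame = (pending children, not_pick, pick); the while-True loop of Source B
def runB (fuel : Nat) (tree : List (Int × List Int)) (check : List Bool)
    (stack : List (List Int × Int × Int)) : Option (Int × Int) :=
  match fuel with
  | 0 => none
  | fuel + 1 =>
    match stack with
    | [] => none
    | (pending, np, p) :: rest =>
      match pending with
      | child :: pending' =>
        match PySem.List.pySet? check child true with    -- check[child] = True
        | none => none
        | some check' =>
          match childrenOf tree check' child with
          | none => none
          | some cs => runB fuel tree check' ((cs, 0, 1) :: (pending', np, p) :: rest)
      | [] =>
        match rest with
        | [] => some (np, p)
        | (pp, pnp, ppk) :: rest' =>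
          runB fuel tree check ((pp, pnp + p, ppk + min np p) :: rest')

def dfs_alt (tree : List (Int × List Int)) (check : List Bool) (n : Int) : Int × Int :=
  match PySem.List.pySet? check n true with
  | none => (0, 0)
  | some check1 =>
    match childrenOf tree check1 n with
    | none => (0, 0)
    | some cs =>
      match runB (bigFuel tree check) tree check1 [(cs, 0, 1)] with
      | some r => r
      | none => (0, 0)

-- ===== PRECONDITION & SPEC =====
-- Static reachability on the input graph, used by Pre_dfs below: the set of nodes reachable from n
-- through adjacency entries whose slot is unmarked in the INITIAL check.  This is a condition on
-- the input only (no check threading, no DP values — it is not a run of either program).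
def initFalse (check0 : List Bool) (w : Int) : Bool := PySem.List.pyGet? check0 w == some false

def innerC (check0 : List Bool) (acc : List Int) : List Int -> List Int
  | [] => acc
  | w :: adj => innerC check0 (if initFalse check0 w && !(acc.contains w) then acc ++ [w] else acc) adj

def outerC (tree : List (Int × List Int)) (check0 : List Bool) : List Int -> List Int -> List Int
  | [], acc => acc
  | v :: l, acc =>
    outerC tree check0 l
      (match lookupAdj tree v with
       | none => acc
       | some adj => innerC check0 acc adj)

def stepC (tree : List (Int × List Int)) (check0 : List Bool) (a : List Int) : List Int :=
  outerC tree check0 a a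

def closureC (tree : List (Int × List Int)) (check0 : List Bool) (n : Int) : List Int :=
  (stepC tree check0)^[adjSize tree + 1] [n]

-- Pre_dfs: the start node is a valid check-index and every statically reachable node (closureC) is
-- a valid check-index and a tree key all of whose adjacency entries are valid check-indices — a
-- closed-form sufficient condition for A to return (no KeyError/IndexError anywhere).  Since the
-- static reachable set slightly over-approximates the dynamically visited set, it excludes a few
-- inputs on which A still returns (e.g. a junk entry whose check slot, via negative-index aliasing,
-- is marked before the traversal would enter it).
def Pre_dfs (tree : List (Int × List Int)) (check : List Bool) (n : Int) : Prop :=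
  PySem.Raise.InRange check.length n ∧
  ∀ v ∈ closureC tree check n, PySem.Raise.InRange check.length v ∧ v ∈ tree.map Prod.fst ∧
    ∀ pr ∈ tree, pr.1 = v → ∀ w ∈ pr.2, PySem.Raise.InRange check.length w

instance (tree : List (Int × List Int)) (check : List Bool) (n : Int) : Decidable (Pre_dfs tree check n) := by
  unfold Pre_dfs; infer_instance

def pvWitness_dfs : (List (Int × List Int)) × List Bool × Int :=
  ([(1, [2, 3]), (2, [1, 3]), (3, [1])], [false, false, false, false], 1)

def Spec_dfs (tree : List (Int × List Int)) (check : List Bool) (n : Int) (out : Int × Int) : Prop := out = dfs_alt tree check n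
instance (tree : List (Int × List Int)) (check : List Bool) (n : Int) (out : Int × Int) : Decidable (Spec_dfs tree check n out) := by unfold Spec_dfs; infer_instance

-- ===== CLAIM (what is proved, stated in full; the proofs are below) =====
def Claim_equal_dfs : Prop := ∀ (tree : List (Int × List Int)) (check : List Bool) (n : Int), Dom_dfs tree check n → Pre_dfs tree check n → Spec_dfs tree check n (dfs tree check n)

-- ===== LEMMAS AND PROOFS =====

lemma pyIdx_lt {L : Nat} {i : Int} {k : Nat} (h : PySem.List.pyIdx? L i = some k) : k < L := by
  unfold PySem.List.pyIdx? at h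
  split_ifs at h <;> simp_all <;> omega

lemma pyIdx_some_of_InRange {L : Nat} {i : Int} (h : PySem.Raise.InRange L i) :
    ∃ k, PySem.List.pyIdx? L i = some k ∧ k < L := by
  obtain ⟨h1, h2⟩ := h
  unfold PySem.List.pyIdx?
  by_cases ha : 0 ≤ i
  · rw [if_pos ha, if_pos h2]
    exact ⟨i.toNat, rfl, by omega⟩
  · rw [if_neg ha, if_pos h1]
    exact ⟨L - (-i).toNat, rfl, by omega⟩

-- check grows monotonically (entries only turn true), same length
def CheckLe (u v : List Bool) : Prop :=
  v.length = u.length ∧ ∀ k : Nat, u[k]? = some true → v[k]? = some true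

lemma CheckLe_refl (u : List Bool) : CheckLe u u := ⟨rfl, fun _ h => h⟩

lemma CheckLe_trans {u v w : List Bool} (h1 : CheckLe u v) (h2 : CheckLe v w) : CheckLe u w :=
  ⟨h2.1.trans h1.1, fun k hk => h2.2 k (h1.2 k hk)⟩

lemma pySet_some {check : List Bool} {n : Int} {check1 : List Bool}
    (h : PySem.List.pySet? check n true = some check1) :
    ∃ k, PySem.List.pyIdx? check.length n = some k ∧ check1 = check.set k true := by
  unfold PySem.List.pySet? at h
  cases hidx : PySem.List.pyIdx? check.length n with
  | none => rw [hidx] at h; simp at h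
  | some k => rw [hidx] at h; simp at h; exact ⟨k, rfl, h.symm⟩

lemma pySet_checkLe {check : List Bool} {n : Int} {check1 : List Bool}
    (h : PySem.List.pySet? check n true = some check1) : CheckLe check check1 := by
  obtain ⟨k, _, rfl⟩ := pySet_some h
  refine ⟨by simp, fun j hj => ?_⟩
  rw [List.getElem?_set]
  split_ifs with he1 he2
  · rfl
  · subst he1
    rw [List.getElem?_eq_none (by omega)] at hj
    exact absurd hj (by simp)
  · exact hj

lemma pySet_sets {check : List Bool} {n : Int} {check1 : List Bool} {k : Nat}
    (h : PySem.List.pySet? check n true = some check1)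
    (hk : PySem.List.pyIdx? check.length n = some k) : check1[k]? = some true := by
  obtain ⟨k', hk', rfl⟩ := pySet_some h
  rw [hk] at hk'; cases hk'
  have : k < check.length := pyIdx_lt hk
  simp [this]

lemma pySet_some_of_InRange {check : List Bool} {n : Int}
    (h : PySem.Raise.InRange check.length n) :
    ∃ check1, PySem.List.pySet? check n true = some check1 := by
  cases hs : PySem.List.pySet? check n true with
  | none => rw [PySem.List.pySet?_eq_none_iff] at hs; exact absurd h hs
  | some c1 => exact ⟨c1, rfl⟩

lemma filterUnchecked_some {check : List Bool} {adj : List Int}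
    (h : ∀ c ∈ adj, PySem.Raise.InRange check.length c) :
    ∃ cs, filterUnchecked check adj = some cs := by
  induction adj with
  | nil => exact ⟨[], rfl⟩
  | cons c rest ih =>
    obtain ⟨cs, hcs⟩ := ih (fun x hx => h x (List.mem_cons_of_mem _ hx))
    cases hg : PySem.List.pyGet? check c with
    | none =>
      rw [PySem.List.pyGet?_eq_none_iff] at hg
      exact absurd (h c (List.mem_cons_self ..)) hg
    | some b => exact ⟨if b then cs else c :: cs, by rw [filterUnchecked, hg, hcs]⟩

lemma filterUnchecked_mem {check : List Bool} {adj cs : List Int}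
    (h : filterUnchecked check adj = some cs) :
    ∀ c ∈ cs, c ∈ adj ∧ ∃ k, PySem.List.pyIdx? check.length c = some k ∧ check[k]? = some false := by
  induction adj generalizing cs with
  | nil => simp [filterUnchecked] at h; subst h; simp
  | cons a rest ih =>
    rw [filterUnchecked] at h
    cases hg : PySem.List.pyGet? check a with
    | none => rw [hg] at h; simp at h
    | some b =>
      rw [hg] at h
      cases hr : filterUnchecked check rest with
      | none => rw [hr] at h; simp at h
      | some cs' =>
        rw [hr] at h; simp at h
        intro c hc
        subst h
        by_cases hb : b
        · subst hb; simp at hc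
          obtain ⟨hm, hk⟩ := ih hr c hc
          exact ⟨List.mem_cons_of_mem _ hm, hk⟩
        · simp [hb] at hc
          rcases hc with rfl | hc
          · refine ⟨List.mem_cons_self .., ?_⟩
            unfold PySem.List.pyGet? at hg
            cases hidx : PySem.List.pyIdx? check.length c with
            | none => rw [hidx] at hg; simp at hg
            | some k =>
              rw [hidx] at hg; simp at hg
              exact ⟨k, rfl, by rw [hg]; simp [hb]⟩
          · obtain ⟨hm, hk⟩ := ih hr c hc
            exact ⟨List.mem_cons_of_mem _ hm, hk⟩

lemma filterUnchecked_len {check : List Bool} {adj cs : List Int}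
    (h : filterUnchecked check adj = some cs) : cs.length ≤ adj.length := by
  induction adj generalizing cs with
  | nil => simp [filterUnchecked] at h; subst h; simp
  | cons a rest ih =>
    rw [filterUnchecked] at h
    cases hg : PySem.List.pyGet? check a with
    | none => rw [hg] at h; simp at h
    | some b =>
      rw [hg] at h
      cases hr : filterUnchecked check rest with
      | none => rw [hr] at h; simp at h
      | some cs' =>
        rw [hr] at h; simp at h; subst h
        have := ih hr
        split_ifs <;> simp <;> omega

lemma lookupAdj_some {tree : List (Int × List Int)} {n : Int}
    (h : n ∈ tree.map Prod.fst) : ∃ adj, lookupAdj tree n = some adj := by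
  induction tree with
  | nil => simp at h
  | cons pr rest ih =>
    by_cases he : pr.1 == n
    · exact ⟨pr.2, by rw [show pr = (pr.1, pr.2) from rfl, lookupAdj, if_pos he]⟩
    · simp at h
      rcases h with h | h
      · simp at he; omega
      · obtain ⟨adj, hadj⟩ := ih (by simpa using h)
        exact ⟨adj, by rw [show pr = (pr.1, pr.2) from rfl, lookupAdj, if_neg he]; exact hadj⟩

lemma lookupAdj_mem_self {tree : List (Int × List Int)} {n : Int} {adj : List Int}
    (h : lookupAdj tree n = some adj) : (n, adj) ∈ tree := by
  induction tree with
  | nil => simp [lookupAdj] at h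
  | cons pr rest ih =>
    rw [show pr = (pr.1, pr.2) from rfl, lookupAdj] at h
    split_ifs at h with he
    · cases h
      simp at he
      subst he
      exact List.mem_cons_self ..
    · exact List.mem_cons_of_mem _ (ih h)

lemma lookupAdj_len {tree : List (Int × List Int)} {n : Int} {adj : List Int}
    (h : lookupAdj tree n = some adj) : adj.length ≤ adjSize tree := by
  have hk := lookupAdj_mem_self h
  unfold adjSize
  have : adj.length ∈ tree.map (fun pr => pr.2.length) := by
    simpa using ⟨n, adj, hk, rfl⟩
  exact List.le_sum_of_mem this

def adjVals (tree : List (Int × List Int)) : List Int := (tree.map Prod.snd).flatten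

lemma mem_adjVals {tree : List (Int × List Int)} {v : Int} {adj : List Int} {w : Int}
    (h : (v, adj) ∈ tree) (hw : w ∈ adj) : w ∈ adjVals tree := by
  unfold adjVals
  rw [List.mem_flatten]
  exact ⟨adj, List.mem_map.mpr ⟨(v, adj), h, rfl⟩, hw⟩

lemma adjVals_length (tree : List (Int × List Int)) : (adjVals tree).length = adjSize tree := by
  unfold adjVals adjSize
  rw [List.length_flatten, List.map_map]
  rfl

lemma innerC_append (check0 : List Bool) :
    ∀ (adj acc : List Int), ∃ e, innerC check0 acc adj = acc ++ e := by
  intro adj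
  induction adj with
  | nil => intro acc; exact ⟨[], by simp [innerC]⟩
  | cons w adj' ih =>
    intro acc
    rw [innerC]
    by_cases hc : (initFalse check0 w && !(acc.contains w)) = true
    · rw [if_pos hc]
      obtain ⟨e, he⟩ := ih (acc ++ [w])
      exact ⟨w :: e, by rw [he]; simp⟩
    · rw [if_neg hc]; exact ih acc

lemma mem_innerC_self {check0 : List Bool} {acc adj : List Int} {x : Int}
    (h : x ∈ acc) : x ∈ innerC check0 acc adj := by
  obtain ⟨e, he⟩ := innerC_append check0 adj acc
  rw [he]; exact List.mem_append_left _ h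

lemma mem_innerC {check0 : List Bool} {w : Int} (hw : initFalse check0 w = true) :
    ∀ (adj acc : List Int), w ∈ adj → w ∈ innerC check0 acc adj := by
  intro adj
  induction adj with
  | nil => intro acc h; simp at h
  | cons x adj' ih =>
    intro acc hmem
    rw [innerC]
    rcases List.mem_cons.mp hmem with rfl | hmem'
    · by_cases hc : (initFalse check0 w && !(acc.contains w)) = true
      · rw [if_pos hc]; exact mem_innerC_self (by simp)
      · rw [if_neg hc]
        apply mem_innerC_self
        simp [hw] at hc
        exact hc
    · exact ih _ hmem'

lemma innerC_sub {check0 : List Bool} :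
    ∀ (adj acc : List Int) (x : Int), x ∈ innerC check0 acc adj → x ∈ acc ∨ x ∈ adj := by
  intro adj
  induction adj with
  | nil => intro acc x h; rw [innerC] at h; exact Or.inl h
  | cons w adj' ih =>
    intro acc x h
    rw [innerC] at h
    rcases ih _ x h with hx | hx
    · by_cases hc : (initFalse check0 w && !(acc.contains w)) = true
      · rw [if_pos hc] at hx
        rcases List.mem_append.mp hx with h1 | h1
        · exact Or.inl h1
        · simp at h1; subst h1; exact Or.inr (List.mem_cons_self ..)
      · rw [if_neg hc] at hx; exact Or.inl hx
    · exact Or.inr (List.mem_cons_of_mem _ hx)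

lemma innerC_nodup {check0 : List Bool} :
    ∀ (adj acc : List Int), acc.Nodup → (innerC check0 acc adj).Nodup := by
  intro adj
  induction adj with
  | nil => intro acc h; rw [innerC]; exact h
  | cons w adj' ih =>
    intro acc h
    rw [innerC]
    by_cases hc : (initFalse check0 w && !(acc.contains w)) = true
    · rw [if_pos hc]
      apply ih
      have hw : w ∉ acc := by simp at hc; exact hc.2
      rw [List.nodup_append]
      exact ⟨h, List.nodup_singleton _, by
        intro a ha b hb
        simp at hb; subst hb
        exact fun he => hw (he ▸ ha)⟩
    · rw [if_neg hc]; exact ih acc h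

lemma outerC_append {tree : List (Int × List Int)} {check0 : List Bool} :
    ∀ (l acc : List Int), ∃ e, outerC tree check0 l acc = acc ++ e := by
  intro l
  induction l with
  | nil => intro acc; exact ⟨[], by simp [outerC]⟩
  | cons v l' ih =>
    intro acc
    rw [outerC]
    cases hadj : lookupAdj tree v with
    | none => exact ih acc
    | some adj =>
      obtain ⟨e1, he1⟩ := innerC_append check0 adj acc
      obtain ⟨e2, he2⟩ := ih (innerC check0 acc adj)
      exact ⟨e1 ++ e2, by rw [he2, he1, List.append_assoc]⟩

lemma mem_outerC_self {tree : List (Int × List Int)} {check0 : List Bool}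
    {l acc : List Int} {x : Int} (h : x ∈ acc) : x ∈ outerC tree check0 l acc := by
  obtain ⟨e, he⟩ := outerC_append l acc
  rw [he]; exact List.mem_append_left _ h

lemma mem_outerC {tree : List (Int × List Int)} {check0 : List Bool} {v w : Int} {adj : List Int}
    (hadj : lookupAdj tree v = some adj) (hw : w ∈ adj) (hif : initFalse check0 w = true) :
    ∀ (l acc : List Int), v ∈ l → w ∈ outerC tree check0 l acc := by
  intro l
  induction l with
  | nil => intro acc h; simp at h
  | cons x l' ih =>
    intro acc hmem
    rw [outerC]
    rcases List.mem_cons.mp hmem with rfl | hmem'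
    · simp only [hadj]
      exact mem_outerC_self (mem_innerC hif adj acc hw)
    · exact ih _ hmem'

lemma outerC_sub {tree : List (Int × List Int)} {check0 : List Bool} :
    ∀ (l acc : List Int) (x : Int), x ∈ outerC tree check0 l acc → x ∈ acc ∨ x ∈ adjVals tree := by
  intro l
  induction l with
  | nil => intro acc x h; rw [outerC] at h; exact Or.inl h
  | cons v l' ih =>
    intro acc x h
    rw [outerC] at h
    cases hadj : lookupAdj tree v with
    | none => simp only [hadj] at h; exact ih _ _ h
    | some adj =>
      simp only [hadj] at h
      rcases ih _ _ h with hx | hx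
      · rcases innerC_sub adj acc x hx with h1 | h1
        · exact Or.inl h1
        · exact Or.inr (mem_adjVals (lookupAdj_mem_self hadj) h1)
      · exact Or.inr hx

lemma outerC_nodup {tree : List (Int × List Int)} {check0 : List Bool} :
    ∀ (l acc : List Int), acc.Nodup → (outerC tree check0 l acc).Nodup := by
  intro l
  induction l with
  | nil => intro acc h; rw [outerC]; exact h
  | cons v l' ih =>
    intro acc h
    rw [outerC]
    cases hadj : lookupAdj tree v with
    | none => exact ih _ h
    | some adj => exact ih _ (innerC_nodup adj acc h)

lemma closureIter_inv (tree : List (Int × List Int)) (check0 : List Bool) (n : Int) :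
    ∀ i, (((stepC tree check0)^[i]) [n]).Nodup ∧
      ∀ x ∈ ((stepC tree check0)^[i]) [n], x = n ∨ x ∈ adjVals tree := by
  intro i
  induction i with
  | zero => simp
  | succ i ih =>
    rw [Function.iterate_succ_apply']
    constructor
    · exact outerC_nodup _ _ ih.1
    · intro x hx
      rcases outerC_sub _ _ x hx with hx' | hx'
      · exact ih.2 x hx'
      · exact Or.inr hx'

lemma n_mem_closureC (tree : List (Int × List Int)) (check0 : List Bool) (n : Int) :
    n ∈ closureC tree check0 n := by
  unfold closureC
  generalize adjSize tree + 1 = K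
  induction K with
  | zero => simp
  | succ K ih =>
    rw [Function.iterate_succ_apply']
    exact mem_outerC_self ih

lemma closureC_fix (tree : List (Int × List Int)) (check0 : List Bool) (n : Int) :
    stepC tree check0 (closureC tree check0 n) = closureC tree check0 n := by
  by_contra hne
  have hnofix : ∀ i, i ≤ adjSize tree + 1 →
      stepC tree check0 ((stepC tree check0)^[i] [n]) ≠ (stepC tree check0)^[i] [n] := by
    intro i hi hfix
    apply hne
    have heq : (stepC tree check0)^[adjSize tree + 1] [n] = (stepC tree check0)^[i] [n] := by
      conv_lhs => rw [show adjSize tree + 1 = (adjSize tree + 1 - i) + i from (by omega)]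
      rw [Function.iterate_add_apply]
      exact Function.iterate_fixed hfix (adjSize tree + 1 - i)
    show stepC tree check0 ((stepC tree check0)^[adjSize tree + 1] [n])
        = (stepC tree check0)^[adjSize tree + 1] [n]
    rw [heq]; exact hfix
  have hgrow : ∀ i, i ≤ adjSize tree + 1 → i + 1 ≤ ((stepC tree check0)^[i] [n]).length := by
    intro i
    induction i with
    | zero => simp
    | succ i ih =>
      intro hi
      have h1 := ih (by omega)
      have hne' := hnofix i (by omega)
      obtain ⟨e, he⟩ := outerC_append ((stepC tree check0)^[i] [n]) ((stepC tree check0)^[i] [n])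
      have hee : e ≠ [] := by
        intro h0
        apply hne'
        show outerC tree check0 _ _ = _
        rw [he, h0]; simp
      rw [Function.iterate_succ_apply']
      show i + 1 + 1 ≤ (outerC tree check0 _ _).length
      rw [he, List.length_append]
      cases e with
      | nil => exact absurd rfl hee
      | cons a e' => simp; omega
  have h1 := hgrow (adjSize tree + 1) le_rfl
  have h2 : ((stepC tree check0)^[adjSize tree + 1] [n]).length ≤ adjSize tree + 1 := by
    obtain ⟨hnd, hsub⟩ := closureIter_inv tree check0 n (adjSize tree + 1)
    have hsub' : ((stepC tree check0)^[adjSize tree + 1] [n]).toFinset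
        ⊆ (n :: adjVals tree).toFinset := by
      intro x hx
      rw [List.mem_toFinset] at *
      rcases hsub x (by exact hx) with rfl | h
      · exact List.mem_cons_self ..
      · exact List.mem_cons_of_mem _ h
    calc ((stepC tree check0)^[adjSize tree + 1] [n]).length
        = ((stepC tree check0)^[adjSize tree + 1] [n]).toFinset.card :=
          (List.toFinset_card_of_nodup hnd).symm
      _ ≤ (n :: adjVals tree).toFinset.card := Finset.card_le_card hsub'
      _ ≤ (n :: adjVals tree).length := List.toFinset_card_le _
      _ = adjSize tree + 1 := by simp [adjVals_length]
  omega

lemma closureC_closed {tree : List (Int × List Int)} {check0 : List Bool} {n v w : Int}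
    {adj : List Int} (hv : v ∈ closureC tree check0 n) (hadj : lookupAdj tree v = some adj)
    (hw : w ∈ adj) (hif : initFalse check0 w = true) : w ∈ closureC tree check0 n := by
  rw [← closureC_fix tree check0 n]
  exact mem_outerC hadj hw hif _ _ hv

-- sufficiency of fuel check.length+1 for A's recursion: along any call chain the marked slots of
-- the ancestors (S) are distinct, so the depth is bounded by check.length; every node entered lies
-- in the static reachable set closureC (a child passing the `not check` filter was unmarked in the
-- initial check, since check only ever gains marks)
lemma suffA (tree : List (Int × List Int)) (L : Nat) (check0 : List Bool) (n0 : Int)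
    (hlen0 : check0.length = L)
    (hpre : ∀ v ∈ closureC tree check0 n0, PySem.Raise.InRange L v ∧ v ∈ tree.map Prod.fst ∧
      ∀ pr ∈ tree, pr.1 = v → ∀ w ∈ pr.2, PySem.Raise.InRange L w) :
    ∀ fuel (check : List Bool) (n : Int) (S : Finset Nat), check.length = L →
    CheckLe check0 check → n ∈ closureC tree check0 n0 →
    (∀ s ∈ S, check[s]? = some true) →
    (∀ k, PySem.List.pyIdx? L n = some k → k ∉ S) →
    L + 1 ≤ fuel + S.card →
    ∃ check' np p, dfsA fuel tree check n = some (check', np, p) ∧ CheckLe check check' := by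
  intro fuel
  induction fuel using Nat.strong_induction_on with
  | _ fuel IH =>
    intro check n S hlen hle0 hmem hS hnotS hfuel
    obtain ⟨hn, hkey, hadjR⟩ := hpre n hmem
    have hScard : S.card ≤ L := by
      have : S ⊆ Finset.range L := by
        intro s hs
        have := hS s hs
        have : s < check.length := by
          by_contra hc
          rw [List.getElem?_eq_none (by omega)] at this; simp at this
        simp; omega
      simpa using Finset.card_le_card this
    obtain ⟨k, hk, hkL⟩ := pyIdx_some_of_InRange hn
    obtain ⟨f', rfl⟩ : ∃ f', fuel = f' + 1 := ⟨fuel - 1, by omega⟩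
    obtain ⟨check1, hset⟩ := pySet_some_of_InRange (by rw [hlen]; exact hn)
    have hle1 : CheckLe check check1 := pySet_checkLe hset
    have hlen1 : check1.length = L := by rw [hle1.1, hlen]
    obtain ⟨adj, hadj⟩ := lookupAdj_some hkey
    have hadjmem : (n, adj) ∈ tree := lookupAdj_mem_self hadj
    have hadjIn : ∀ w ∈ adj, PySem.Raise.InRange L w := hadjR (n, adj) hadjmem rfl
    obtain ⟨cs, hcs⟩ := filterUnchecked_some
      (fun c hc => by rw [hlen1]; exact hadjIn c hc)
    -- the new ancestor set
    set S' : Finset Nat := insert k S with hS'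
    have hkS : k ∉ S := hnotS k hk
    have hcardS' : S'.card = S.card + 1 := Finset.card_insert_of_notMem hkS
    have hS'true : ∀ s ∈ S', check1[s]? = some true := by
      intro s hs
      rcases Finset.mem_insert.mp hs with rfl | hs
      · exact pySet_sets hset (by rw [hlen]; exact hk)
      · exact hle1.2 s (hS s hs)
    have hcsfacts := filterUnchecked_mem hcs
    -- inner loop over the children
    have inner : ∀ (cs0 : List Int),
        (∀ c ∈ cs0, c ∈ closureC tree check0 n0 ∧
          ∀ kc, PySem.List.pyIdx? L c = some kc → kc ∉ S') →
        ∀ (ccur : List Bool) (np p : Int), ccur.length = L → CheckLe check0 ccur →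
        (∀ s ∈ S', ccur[s]? = some true) →
        ∃ check' np' p', goA f' tree ccur cs0 np p = some (check', np', p') ∧ CheckLe ccur check' := by
      intro cs0
      induction cs0 with
      | nil => intro _ ccur np p _ _ _; exact ⟨ccur, np, p, by rw [goA], CheckLe_refl _⟩
      | cons c crest ihc =>
        intro hfacts ccur np p hclen hcle0 hctrue
        obtain ⟨hcmem, hcnot⟩ := hfacts c (List.mem_cons_self ..)
        obtain ⟨check2, cnp, cp, hrec, hle2⟩ := IH f' (by omega) ccur c S' hclen hcle0 hcmem
          hctrue hcnot (by omega)
        obtain ⟨check3, np', p', hgo, hle3⟩ := ihc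
          (fun x hx => hfacts x (List.mem_cons_of_mem _ hx))
          check2 (np + cp) (p + min cnp cp) (by rw [hle2.1, hclen])
          (CheckLe_trans hcle0 hle2)
          (fun s hs => hle2.2 s (hctrue s hs))
        exact ⟨check3, np', p', by rw [goA, hrec]; exact hgo, CheckLe_trans hle2 hle3⟩
    obtain ⟨check', np', p', hgo, hle'⟩ := inner cs
      (by
        intro c hc
        obtain ⟨hmemadj, kc, hkc, hfalse⟩ := hcsfacts c hc
        rw [hlen1] at hkc
        have hkcL : kc < L := pyIdx_lt hkc
        obtain ⟨b, hb⟩ : ∃ b, check0[kc]? = some b :=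
          ⟨_, List.getElem?_eq_getElem (by rw [hlen0]; exact hkcL)⟩
        cases b with
        | true =>
          -- impossible: the slot stayed true all along, yet the filter saw false
          have h1 : check[kc]? = some true := hle0.2 kc hb
          have h2 : check1[kc]? = some true := hle1.2 kc h1
          exact absurd (h2.symm.trans hfalse) (by simp)
        | false =>
          have hif : initFalse check0 c = true := by
            unfold initFalse PySem.List.pyGet?
            rw [hlen0, hkc]
            simp [hb]
          refine ⟨closureC_closed hmem hadj hmemadj hif, ?_⟩
          intro kc2 hkc2 hin
          rw [hkc] at hkc2
          obtain rfl := Option.some.inj hkc2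
          have := hS'true kc hin
          rw [hfalse] at this; simp at this)
      check1 0 1 hlen1 (CheckLe_trans hle0 hle1) hS'true
    refine ⟨check', np', p', ?_, CheckLe_trans hle1 hle'⟩
    simp only [dfsA, hset, childrenOf, hadj, hcs]
    exact hgo

lemma runB_mono {tree : List (Int × List Int)} :
    ∀ (F G : Nat) (check : List Bool) (stack : List (List Int × Int × Int)) (out : Int × Int),
    F ≤ G → runB F tree check stack = some out → runB G tree check stack = some out := by
  intro F
  induction F with
  | zero => intro G check stack out _ h; simp [runB] at h
  | succ F ih =>
    intro G check stack out hFG h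
    obtain ⟨G', rfl⟩ : ∃ G', G = G' + 1 := ⟨G - 1, by omega⟩
    cases stack with
    | nil => simp [runB] at h
    | cons fr rest =>
      obtain ⟨pending, np, p⟩ := fr
      cases pending with
      | cons child pending' =>
        cases hset : PySem.List.pySet? check child true with
        | none => simp [runB, hset] at h
        | some check' =>
          cases hcs : childrenOf tree check' child with
          | none => simp [runB, hset, hcs] at h
          | some cs =>
            simp only [runB, hset, hcs] at h
            simp only [runB, hset, hcs]
            exact ih G' _ _ _ (by omega) h
      | nil =>
        cases rest with
        | nil => simp only [runB] at h; simp only [runB]; exact h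
        | cons pf rest' =>
          obtain ⟨pp, pnp, ppk⟩ := pf
          simp only [runB] at h
          simp only [runB]
          exact ih G' _ _ _ (by omega) h

-- the stack machine simulates A's loop: finishing the top frame costs at most (|cs|+1)·C^fuel steps
lemma simGo {tree : List (Int × List Int)} :
    ∀ fuel (cs : List Int) (check : List Bool) (np p : Int)
      (check' : List Bool) (np' p' : Int),
    goA fuel tree check cs np p = some (check', np', p') →
    ∀ (rest : List (List Int × Int × Int)) (F : Nat) (out : Int × Int),
    runB F tree check' (([], np', p') :: rest) = some out →
    runB (F + (cs.length + 1) * (adjSize tree + 3) ^ fuel) tree check ((cs, np, p) :: rest)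
      = some out := by
  intro fuel
  induction fuel using Nat.strong_induction_on with
  | _ fuel IH =>
    intro cs
    induction cs with
    | nil =>
      intro check np p check' np' p' hgo rest F out hfin
      rw [goA] at hgo
      simp at hgo
      obtain ⟨rfl, rfl, rfl⟩ := hgo
      exact runB_mono F _ _ _ _ (by omega) hfin
    | cons c cs' ihcs =>
      intro check np p check' np' p' hgo rest F out hfin
      cases hrec : dfsA fuel tree check c with
      | none => simp [goA, hrec] at hgo
      | some r =>
        obtain ⟨chd, cnp, cp⟩ := r
        simp only [goA, hrec] at hgo
        -- dfsA succeeded, so fuel = f' + 1 and it unfolds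
        obtain ⟨f', rfl⟩ : ∃ f', fuel = f' + 1 := by
          cases fuel with
          | zero => rw [dfsA] at hrec; simp at hrec
          | succ f' => exact ⟨f', rfl⟩
        cases hset : PySem.List.pySet? check c true with
        | none => simp [dfsA, hset] at hrec
        | some check_set =>
          cases hcsc : childrenOf tree check_set c with
          | none => simp [dfsA, hset, hcsc] at hrec
          | some csc =>
            simp only [dfsA, hset, hcsc] at hrec
            set C : Nat := adjSize tree + 3 with hC
            -- tail of the loop
            have h2 := ihcs chd (np + cp) (p + min cnp cp) check' np' p' hgo rest F out hfin
            -- the pop-merge step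
            have h3 : runB (F + (cs'.length + 1) * C ^ (f' + 1) + 1) tree chd
                (([], cnp, cp) :: (cs', np, p) :: rest) = some out := by
              simp only [runB]; exact h2
            -- the child's whole run (strong IH at f')
            have h4 := IH f' (by omega) csc check_set 0 1 chd cnp cp hrec
              ((cs', np, p) :: rest) (F + (cs'.length + 1) * C ^ (f' + 1) + 1) out h3
            -- the push step
            have h5 : runB (F + (cs'.length + 1) * C ^ (f' + 1) + 1
                  + (csc.length + 1) * C ^ f' + 1) tree check
                ((c :: cs', np, p) :: rest) = some out := by
              simp only [runB, hset, hcsc]; exact h4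
            refine runB_mono _ _ _ _ _ ?_ h5
            -- fuel arithmetic: (|csc|+1)·C^f' + 2 ≤ C^(f'+1) since |csc| ≤ adjSize tree
            have hcscle : csc.length ≤ adjSize tree := by
              unfold childrenOf at hcsc
              cases hadj : lookupAdj tree c with
              | none => rw [hadj] at hcsc; simp at hcsc
              | some adj =>
                rw [hadj] at hcsc
                exact le_trans (filterUnchecked_len hcsc) (lookupAdj_len hadj)
            have hp1 : 1 ≤ C ^ f' := Nat.one_le_pow _ _ (by omega)
            have hpow : C ^ (f' + 1) = C ^ f' * C := pow_succ C f'
            have hkey : (csc.length + 1) * C ^ f' + 2 ≤ C ^ (f' + 1) := by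
              rw [hpow]
              have : (csc.length + 1) * C ^ f' ≤ (adjSize tree + 1) * C ^ f' :=
                Nat.mul_le_mul_right _ (by omega)
              nlinarith
            have : (c :: cs').length = cs'.length + 1 := by simp
            rw [this]
            nlinarith [Nat.one_le_pow (f' + 1) C (by omega : 0 < C)]

-- ===== VERDICT (by name: the statement is the Claim_ definition above) =====
theorem dfs_spec : Claim_equal_dfs := by
  intro tree check n _ hpre
  obtain ⟨hn, hclos⟩ := hpre
  obtain ⟨check2, np, p, hA, _⟩ := suffA tree check.length check n rfl hclos
    (check.length + 1) check n ∅ rfl (CheckLe_refl check) (n_mem_closureC tree check n)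
    (by simp) (by simp) (by simp)
  -- unfold A's top call
  cases hset : PySem.List.pySet? check n true with
  | none => simp [dfsA, hset] at hA
  | some check1 =>
    cases hcs : childrenOf tree check1 n with
    | none => simp [dfsA, hset, hcs] at hA
    | some cs0 =>
      simp only [dfsA, hset, hcs] at hA
      -- B's run
      have hfin : runB 1 tree check2 [([], np, p)] = some (np, p) := by rw [runB]
      have hrun := simGo (check.length) cs0 check1 0 1 check2 np p hA [] 1 (np, p) hfin
      have hbig : 1 + (cs0.length + 1) * (adjSize tree + 3) ^ check.length ≤ bigFuel tree check := by
        unfold bigFuel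
        set S := adjSize tree with hS
        have hcs0 : cs0.length ≤ S := by
          unfold childrenOf at hcs
          cases hadj : lookupAdj tree n with
          | none => rw [hadj] at hcs; simp at hcs
          | some adj =>
            rw [hadj] at hcs
            exact le_trans (filterUnchecked_len hcs) (lookupAdj_len hadj)
        have hp1 : 1 ≤ (S + 3) ^ check.length := Nat.one_le_pow _ _ (by omega)
        have hpow : (S + 3) ^ (check.length + 2) = (S + 3) ^ check.length * ((S + 3) * (S + 3)) := by
          ring
        rw [hpow]
        have h1 : (cs0.length + 1) * (S + 3) ^ check.length ≤ (S + 1) * (S + 3) ^ check.length :=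
          Nat.mul_le_mul_right _ (by omega)
        have h2 : (S + 3) ^ check.length * (S + 2) ≤ (S + 3) ^ check.length * ((S + 3) * (S + 3)) :=
          Nat.mul_le_mul_left _ (by nlinarith)
        have e : (S + 3) ^ check.length * (S + 2)
            = (S + 1) * (S + 3) ^ check.length + (S + 3) ^ check.length := by ring
        linarith
      have hrunBig := runB_mono _ _ _ _ _ hbig hrun
      have hAfull : dfsA (check.length + 1) tree check n = some (check2, np, p) := by
        simp only [dfsA, hset, hcs]; exact hA
      show dfs tree check n = dfs_alt tree check n
      unfold dfs dfs_alt
      simp only [hAfull, hset, hcs, hrunBig]
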